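-- pv_equiv track=rewrite | github.com/Salanmander/CrawlCalc | crawlCalc.py | get_integer_histogram_bins
-- ===== SOURCE A (Python) =====
-- def get_integer_histogram_bins(max_val, num_bins):
--
--     # The even spacing gets split across (num_bins - 1) bins
--     spaced_bins = num_bins - 1
--     small_bin_size = max_val // spaced_bins
--
--     # The remainder is the number of bins that need to be large
--     # So the number of bins that need to be small is the number
--     # of bins with even spacing minus that
--     small_bins = spaced_bins - max_val % (num_bins - 1)
--
--     bin_tops = [0]
--
--     for i in range(num_bins - 1):
--         size = small_bin_size
--
--         # if we need 3 small bins, then those are i = 0, 1, 2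
--         # Anything larger is a big bin
--         if i >= small_bins:
--             size += 1
--
--         bin_tops.append(bin_tops[-1] + size)
--
--     return bin_tops
-- ===== SOURCE B (Python) =====
-- def get_integer_histogram_bins(max_val, num_bins):
--     spaced_bins = num_bins - 1
--     small_bin_size = max_val // spaced_bins
--     small_bins = spaced_bins - max_val % spaced_bins
--     # closed form: boundary j is j small bins plus one extra unit per big bin at or below j
--     return [0] + [j * small_bin_size + max(0, j - small_bins)
--                   for j in range(1, num_bins)]
-- ===== Notes on version B (the rewrite author's own statement) =====
-- stated objective: simpler
-- what changed: Replaces the running-accumulator loop over bin_tops[-1] with a direct closed-form comprehension computing each boundary independently as j*small_bin_size + max(0, j - small_bins).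
import Mathlib
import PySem

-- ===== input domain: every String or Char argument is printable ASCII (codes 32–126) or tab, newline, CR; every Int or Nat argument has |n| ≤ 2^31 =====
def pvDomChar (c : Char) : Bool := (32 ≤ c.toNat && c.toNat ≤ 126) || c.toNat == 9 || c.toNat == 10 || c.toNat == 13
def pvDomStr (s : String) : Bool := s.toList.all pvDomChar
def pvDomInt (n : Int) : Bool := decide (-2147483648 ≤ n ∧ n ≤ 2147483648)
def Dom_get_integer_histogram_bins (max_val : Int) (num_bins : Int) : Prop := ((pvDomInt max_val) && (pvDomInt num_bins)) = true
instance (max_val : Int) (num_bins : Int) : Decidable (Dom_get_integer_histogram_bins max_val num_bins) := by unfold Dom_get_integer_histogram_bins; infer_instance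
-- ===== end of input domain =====

-- B replaces A's running-accumulator loop by a closed-form comprehension (objective: simpler).

-- ===== PORT A =====
def get_integer_histogram_bins (max_val : Int) (num_bins : Int) : List Int :=
  let spaced_bins := num_bins - 1
  let small_bin_size := PySem.Int.floordiv max_val spaced_bins
  let small_bins := spaced_bins - PySem.Int.mod max_val (num_bins - 1)
  (PySem.List.pyRange 0 (num_bins - 1) 1).foldl
    (fun bin_tops i =>
      let size := if i ≥ small_bins then small_bin_size + 1 else small_bin_size
      bin_tops ++ [(PySem.List.pyGet? bin_tops (-1)).getD 0 + size])
    [0]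

-- ===== PORT B =====
def get_integer_histogram_bins_alt (max_val : Int) (num_bins : Int) : List Int :=
  let spaced_bins := num_bins - 1
  let small_bin_size := PySem.Int.floordiv max_val spaced_bins
  let small_bins := spaced_bins - PySem.Int.mod max_val spaced_bins
  [0] ++ (PySem.List.pyRange 1 num_bins 1).map
    (fun j => j * small_bin_size + max 0 (j - small_bins))

-- ===== PRECONDITION & SPEC =====
-- num_bins = 1 makes both programs divide by zero (ZeroDivisionError); excluded.
def Pre_get_integer_histogram_bins (max_val : Int) (num_bins : Int) : Prop := num_bins ≠ 1
instance (max_val : Int) (num_bins : Int) : Decidable (Pre_get_integer_histogram_bins max_val num_bins) := by unfold Pre_get_integer_histogram_bins; infer_instance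
def pvWitness_get_integer_histogram_bins : Int × Int := (10, 4)

def Spec_get_integer_histogram_bins (max_val : Int) (num_bins : Int) (out : List Int) : Prop := out = get_integer_histogram_bins_alt max_val num_bins
instance (max_val : Int) (num_bins : Int) (out : List Int) : Decidable (Spec_get_integer_histogram_bins max_val num_bins out) := by unfold Spec_get_integer_histogram_bins; infer_instance

-- ===== CLAIM (what is proved, stated in full; the proofs are below) =====
def Claim_equal_get_integer_histogram_bins : Prop := ∀ (max_val : Int) (num_bins : Int), Dom_get_integer_histogram_bins max_val num_bins → Pre_get_integer_histogram_bins max_val num_bins → Spec_get_integer_histogram_bins max_val num_bins (get_integer_histogram_bins max_val num_bins)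

-- ===== LEMMAS AND PROOFS =====

-- invariant: after n iterations the accumulator is exactly the closed-form list for indices 0..n
lemma hist_loop (sbs small : Int) (hsmall : 0 < small) : ∀ n : Nat,
    (PySem.List.pyRange 0 (n : Int) 1).foldl
      (fun bin_tops i =>
        let size := if i ≥ small then sbs + 1 else sbs
        bin_tops ++ [(PySem.List.pyGet? bin_tops (-1)).getD 0 + size])
      [0]
    = (PySem.List.pyRange 0 ((n : Int) + 1) 1).map (fun j => j * sbs + max 0 (j - small)) := by
  intro n
  induction n with
  | zero =>
      rw [show ((0 : Nat) : Int) + 1 = (0 : Int) + 1 by norm_num,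
          PySem.List.pyRange_one_singleton]
      simp
      omega
  | succ n ih =>
      rw [show ((n + 1 : Nat) : Int) = (n : Int) + 1 by push_cast; ring,
          PySem.List.pyRange_one_succ_right (by positivity),
          List.foldl_append, ih,
          PySem.List.pyRange_one_succ_right (a := 0) (b := (n : Int) + 1) (by positivity),
          PySem.List.pyRange_one_succ_right (a := 0) (b := (n : Int)) (by positivity),
          List.map_append, List.map_append]
      simp only [List.foldl_cons, List.foldl_nil, List.map_cons, List.map_nil,
        PySem.List.pyGet?_neg_one_append_singleton, Option.getD_some, List.append_assoc,
        List.singleton_append]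
      have hlast : ((n : Int) * sbs + max 0 ((n : Int) - small) +
          if (n : Int) ≥ small then sbs + 1 else sbs)
          = ((n : Int) + 1) * sbs + max 0 ((n : Int) + 1 - small) := by
        have hmul : ((n : Int) + 1) * sbs = (n : Int) * sbs + sbs := by ring
        rw [hmul]
        split_ifs with h <;> omega
      rw [hlast]
      simp

-- ===== VERDICT (by name: the statement is the Claim_ definition above) =====
theorem get_integer_histogram_bins_spec : Claim_equal_get_integer_histogram_bins := by
  intro max_val num_bins _ hpre
  unfold Spec_get_integer_histogram_bins get_integer_histogram_bins get_integer_histogram_bins_alt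
  by_cases hnb : num_bins ≤ 0
  · rw [PySem.List.pyRange_one_eq_nil (by omega), PySem.List.pyRange_one_eq_nil (by omega)]
    simp
  · -- num_bins ≥ 2
    have h2 : 2 ≤ num_bins := by unfold Pre_get_integer_histogram_bins at hpre; omega
    have hsp : 0 < num_bins - 1 := by omega
    have hmod : PySem.Int.mod max_val (num_bins - 1) < num_bins - 1 := by
      rw [PySem.Int.mod_eq_emod_of_pos hsp]
      exact Int.emod_lt_of_pos _ hsp
    have hsmall : 0 < (num_bins - 1) - PySem.Int.mod max_val (num_bins - 1) := by omega
    have hn : num_bins - 1 = ((num_bins - 1).toNat : Int) := by omega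
    have := hist_loop (PySem.Int.floordiv max_val (num_bins - 1))
      ((num_bins - 1) - PySem.Int.mod max_val (num_bins - 1)) hsmall (num_bins - 1).toNat
    rw [← hn] at this
    rw [this, show num_bins - 1 + 1 = num_bins by ring,
        PySem.List.pyRange_one_cons (by omega), List.map_cons]
    simp
    omega
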